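-- pv_equiv track=rewrite | github.com/bsulman/ISCN-Zstar | zstar_analysis.py | get_soil_order
-- ===== SOURCE A (Python) =====
-- soil_order_mappings = {
-- 'alf':'Alfisol',
-- 'and':'Andisol',
-- 'el':'Gelisol',
-- 'ent':'Entisol',
-- 'ept':'Inceptisol',
-- 'ert':'Vertisol',
-- 'id':'Aridisol',
-- 'ist':'Histosol',
-- 'od':'Spodosol',
-- 'oll':'Mollisol',
-- 'ox':'Oxisol',
-- 'ult':'Ultisol',
-- }
--
-- def get_soil_order(soil_name):
--     if not isinstance(soil_name,str):
--         return 'Unknown'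
--     elif len(soil_name.split())>1:
--         # Multiple words in soil taxon. Try to get order, starting from the end
--         for word in soil_name.split()[::-1]:
--             order=get_soil_order(word.strip(' ,.;'))
--             if order != 'Unknown':
--                 return order
--         return 'Unknown'
--     elif soil_name.capitalize() in soil_order_mappings.values():
--         return soil_name.capitalize()
--     elif soil_name.lower().endswith('s'):
--         return get_soil_order(soil_name[:-1])
--     else:
--         name=soil_name.lower()
--         if name[-2:] in ['el','id','od','ox']:
--             return soil_order_mappings.get(name[-2:],'Unknown')
--         else:
--             return soil_order_mappings.get(name[-3:],'Unknown')
-- ===== SOURCE B (Python) =====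
-- soil_order_mappings = {
-- 'alf':'Alfisol',
-- 'and':'Andisol',
-- 'el':'Gelisol',
-- 'ent':'Entisol',
-- 'ept':'Inceptisol',
-- 'ert':'Vertisol',
-- 'id':'Aridisol',
-- 'ist':'Histosol',
-- 'od':'Spodosol',
-- 'oll':'Mollisol',
-- 'ox':'Oxisol',
-- 'ult':'Ultisol',
-- }
--
-- _order_names = set(soil_order_mappings.values())
-- _two_char_suffixes = ('el', 'id', 'od', 'ox')
--
-- def _classify_word(w):
--     # single-word classification as an explicit peel loop
--     while True:
--         cap = w.capitalize()
--         if cap in _order_names: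
--             return cap
--         if w.lower().endswith('s'):
--             w = w[:-1]
--             continue
--         low = w.lower()
--         if low[-2:] in _two_char_suffixes:
--             return soil_order_mappings.get(low[-2:], 'Unknown')
--         return soil_order_mappings.get(low[-3:], 'Unknown')
--
-- def get_soil_order(soil_name):
--     if not isinstance(soil_name, str):
--         return 'Unknown'
--     words = soil_name.split()
--     if len(words) > 1:
--         for word in reversed(words):
--             order = _classify_word(word.strip(' ,.;'))
--             if order != 'Unknown':
--                 return order
--         return 'Unknown'
--     return _classify_word(soil_name)
-- ===== Notes on version B (the rewrite author's own statement) =====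
-- stated objective: alternative
-- what changed: Both of A's self-recursions are replaced by explicit loops with the single-word classification factored into a standalone helper: a while loop that peels the plural suffix one character at a time and re-checks the order-name match, plus a for loop over the reversed word list; the order names are held in a prebuilt set.
import Mathlib
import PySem

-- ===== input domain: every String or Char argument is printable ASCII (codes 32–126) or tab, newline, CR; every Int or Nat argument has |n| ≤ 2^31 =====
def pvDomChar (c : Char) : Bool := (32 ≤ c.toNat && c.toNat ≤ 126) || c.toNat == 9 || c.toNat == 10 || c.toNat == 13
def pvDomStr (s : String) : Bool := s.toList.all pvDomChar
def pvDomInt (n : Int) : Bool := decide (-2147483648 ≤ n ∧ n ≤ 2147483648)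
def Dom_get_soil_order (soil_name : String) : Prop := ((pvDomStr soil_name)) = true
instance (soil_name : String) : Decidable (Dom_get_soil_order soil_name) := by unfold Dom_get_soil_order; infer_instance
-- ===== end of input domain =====

-- B replaces A's two self-recursions by a single-word peel loop helper plus an explicit loop over the
-- reversed word list (same values everywhere; objective: alternative decomposition, not speed).

-- ===== PORT A =====

-- the module-level dict soil_order_mappings (keys/values as char lists)
def soilOrderMappings : PySem.Dict (List Char) (List Char) :=
  PySem.Dict.ofList
  [("alf".toList, "Alfisol".toList), ("and".toList, "Andisol".toList),
   ("el".toList, "Gelisol".toList), ("ent".toList, "Entisol".toList),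
   ("ept".toList, "Inceptisol".toList), ("ert".toList, "Vertisol".toList),
   ("id".toList, "Aridisol".toList), ("ist".toList, "Histosol".toList),
   ("od".toList, "Spodosol".toList), ("oll".toList, "Mollisol".toList),
   ("ox".toList, "Oxisol".toList), ("ult".toList, "Ultisol".toList)]

-- str.capitalize() : first char uppercased, rest lowercased (exact on the ASCII domain)
def pyCapitalize (cs : List Char) : List Char :=
  match cs with
  | [] => []
  | c :: rest => PySem.Chars.upperChar c :: PySem.Chars.lower rest

-- the strip(' ,.;') character set
def gsoPunct : List Char := [' ', ',', '.', ';']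

mutual
-- A's recursive function; the Nat argument is fuel making the Python recursion well-founded in Lean
-- (get_soil_order passes enough fuel that the 0 case is never reached — proved below).
def gsoA : Nat → List Char → List Char
  | 0, _ => "Unknown".toList
  | fuel + 1, s =>
    let words := PySem.Chars.split₀ s
    if words.length > 1 then
      gsoALoop fuel words.reverse          -- for word in soil_name.split()[::-1]: …
    else if pyCapitalize s ∈ PySem.Dict.values soilOrderMappings then
      pyCapitalize s
    else if PySem.Chars.endswith (PySem.Chars.lower s) ['s'] then
      gsoA fuel (PySem.List.slice s none (some (-1)))          -- soil_name[:-1]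
    else
      let name := PySem.Chars.lower s
      if PySem.List.slice name (some (-2)) none ∈ ["el".toList, "id".toList, "od".toList, "ox".toList] then
        PySem.Dict.getD soilOrderMappings (PySem.List.slice name (some (-2)) none) "Unknown".toList
      else
        PySem.Dict.getD soilOrderMappings (PySem.List.slice name (some (-3)) none) "Unknown".toList
termination_by fuel _ => (fuel, 0)

-- the for-loop of A's multi-word branch
def gsoALoop : Nat → List (List Char) → List Char
  | _, [] => "Unknown".toList
  | fuel, w :: rest =>
    let order := gsoA fuel (PySem.Chars.stripChars w gsoPunct)
    if order ≠ "Unknown".toList then order else gsoALoop fuel rest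
termination_by fuel ws => (fuel, ws.length + 1)
end

def get_soil_order (soil_name : String) : String :=
  String.ofList (gsoA (soil_name.toList.length + 2) soil_name.toList)

-- ===== PORT B =====

def gsoOrderNames : PySem.Set (List Char) :=
  PySem.Set.ofList (PySem.Dict.values soilOrderMappings)

def gsoTwoChar : List (List Char) := ["el".toList, "id".toList, "od".toList, "ox".toList]

-- B's while-loop _classify_word, as recursion on the peeled word
def classifyB (w : List Char) : List Char :=
  let cap := pyCapitalize w
  if cap ∈ gsoOrderNames then cap
  else if h : PySem.Chars.endswith (PySem.Chars.lower w) ['s'] then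
    classifyB w.dropLast
  else
    let low := PySem.Chars.lower w
    if PySem.List.slice low (some (-2)) none ∈ gsoTwoChar then
      PySem.Dict.getD soilOrderMappings (PySem.List.slice low (some (-2)) none) "Unknown".toList
    else
      PySem.Dict.getD soilOrderMappings (PySem.List.slice low (some (-3)) none) "Unknown".toList
termination_by w.length
decreasing_by
  have hs := (PySem.Chars.endswith_iff _ _).1 h
  have : 1 ≤ (PySem.Chars.lower w).length := hs.length_le
  simp [PySem.Chars.lower] at this
  have hw : w ≠ [] := by intro hnil; simp [hnil] at this
  simpa using Nat.pred_lt (by simpa [List.length_eq_zero_iff] using hw)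

-- B's for-loop over the reversed word list
def gsoBLoop : List (List Char) → List Char
  | [] => "Unknown".toList
  | w :: rest =>
    let order := classifyB (PySem.Chars.stripChars w gsoPunct)
    if order ≠ "Unknown".toList then order else gsoBLoop rest

def get_soil_order_alt (soil_name : String) : String :=
  let words := PySem.Chars.split₀ soil_name.toList
  if words.length > 1 then String.ofList (gsoBLoop words.reverse)
  else String.ofList (classifyB soil_name.toList)

-- ===== PRECONDITION & SPEC =====
def Spec_get_soil_order (soil_name : String) (out : String) : Prop := out = get_soil_order_alt soil_name
instance (soil_name : String) (out : String) : Decidable (Spec_get_soil_order soil_name out) := by unfold Spec_get_soil_order; infer_instance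

-- ===== CLAIM (what is proved, stated in full; the proofs are below) =====
def Claim_equal_get_soil_order : Prop := ∀ (soil_name : String), Dom_get_soil_order soil_name → Spec_get_soil_order soil_name (get_soil_order soil_name)

-- ===== LEMMAS AND PROOFS =====

-- reference recursion computing Python str.split(): the list of whitespace-separated words
def pvWordsOf : List Char → List (List Char)
  | [] => []
  | c :: rest =>
    if PySem.Chars.isspace c then pvWordsOf rest
    else (c :: rest.takeWhile (fun d => !PySem.Chars.isspace d)) ::
         pvWordsOf (rest.dropWhile (fun d => !PySem.Chars.isspace d))
termination_by cs => cs.length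
decreasing_by
  · simp
  · exact Nat.lt_succ_of_le (List.length_dropWhile_le _ _)

theorem split₀_go_eq (rest : List Char) : ∀ (cur : List Char) (acc : List (List Char)),
    PySem.Chars.split₀.go rest cur acc =
      acc.reverse ++ (if cur = [] then pvWordsOf rest
        else (cur.reverse ++ rest.takeWhile (fun d => !PySem.Chars.isspace d)) ::
             pvWordsOf (rest.dropWhile (fun d => !PySem.Chars.isspace d))) := by
  induction rest with
  | nil =>
    intro cur acc
    rcases eq_or_ne cur [] with h | h <;>
      simp [PySem.Chars.split₀.go, pvWordsOf, h, List.isEmpty_iff]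
  | cons c rest ih =>
    intro cur acc
    by_cases hc : PySem.Chars.isspace c
    · rcases eq_or_ne cur [] with h | h
      · simp [PySem.Chars.split₀.go, hc, h, List.isEmpty_iff, ih, pvWordsOf]
      · simp [PySem.Chars.split₀.go, hc, h, List.isEmpty_iff, ih, pvWordsOf]
    · rcases eq_or_ne cur [] with h | h <;>
        simp [PySem.Chars.split₀.go, hc, h, List.isEmpty_iff, ih, pvWordsOf,
          List.takeWhile_cons, List.dropWhile_cons]

theorem split₀_eq (cs : List Char) : PySem.Chars.split₀ cs = pvWordsOf cs := by
  simpa using split₀_go_eq cs [] []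

theorem mem_pvWordsOf {cs w : List Char} (h : w ∈ pvWordsOf cs) :
    (∀ c ∈ w, PySem.Chars.isspace c = false) ∧ w.length ≤ cs.length := by
  induction cs using pvWordsOf.induct with
  | case1 => simp [pvWordsOf] at h
  | case2 c rest hc ih =>
    rw [pvWordsOf, if_pos hc] at h
    obtain ⟨h1, h2⟩ := ih h
    exact ⟨h1, h2.trans (Nat.le_succ _)⟩
  | case3 c rest hc ih =>
    rw [pvWordsOf, if_neg hc] at h
    rcases List.mem_cons.1 h with rfl | h
    · refine ⟨?_, ?_⟩
      · intro d hd
        rcases List.mem_cons.1 hd with rfl | hd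
        · simpa using hc
        · simpa using List.mem_takeWhile_imp hd
      · simpa using Nat.succ_le_succ ((List.takeWhile_sublist _).length_le)
    · obtain ⟨h1, h2⟩ := ih h
      exact ⟨h1, h2.trans ((List.length_dropWhile_le _ rest).trans (Nat.le_succ _))⟩

theorem pvWordsOf_eq_nil {t : List Char} (h : pvWordsOf t = []) :
    ∀ c ∈ t, PySem.Chars.isspace c = true := by
  induction t using pvWordsOf.induct with
  | case1 => simp
  | case2 c rest hc ih =>
    rw [pvWordsOf, if_pos hc] at h
    intro d hd
    rcases List.mem_cons.1 hd with rfl | hd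
    · exact hc
    · exact ih h d hd
  | case3 c rest hc ih =>
    rw [pvWordsOf, if_neg hc] at h
    simp at h

theorem pvWordsOf_space_append {a t : List Char} (h : ∀ c ∈ a, PySem.Chars.isspace c = true) :
    pvWordsOf (a ++ t) = pvWordsOf t := by
  induction a with
  | nil => simp
  | cons c a ih =>
    have hc := h c (by simp)
    rw [List.cons_append, pvWordsOf, if_pos hc]
    exact ih (fun d hd => h d (by simp [hd]))


theorem pvWordsOf_space {t : List Char} (h : ∀ c ∈ t, PySem.Chars.isspace c = true) :
    pvWordsOf t = [] := by
  have := pvWordsOf_space_append (a := t) (t := []) h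
  simpa [pvWordsOf] using this

theorem pvWordsOf_shape {a w b : List Char} (ha : ∀ c ∈ a, PySem.Chars.isspace c = true)
    (hw : ∀ c ∈ w, PySem.Chars.isspace c = false) (hb : ∀ c ∈ b, PySem.Chars.isspace c = true) :
    pvWordsOf (a ++ w ++ b) = if w = [] then [] else [w] := by
  rw [List.append_assoc, pvWordsOf_space_append ha]
  cases w with
  | nil => simp [pvWordsOf_space hb]
  | cons c w =>
    have hc : PySem.Chars.isspace c = false := hw c (by simp)
    have htw : (w ++ b).takeWhile (fun d => !PySem.Chars.isspace d) = w := by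
      rw [List.takeWhile_append]
      have : w.takeWhile (fun d => !PySem.Chars.isspace d) = w :=
        List.takeWhile_eq_self_iff.2 (fun d hd => by simp [hw d (by simp [hd])])
      rw [this]
      simp
      cases b with
      | nil => simp
      | cons d b => simp [List.takeWhile_cons, hb d (by simp)]
    have hdw : (w ++ b).dropWhile (fun d => !PySem.Chars.isspace d) = b := by
      rw [List.dropWhile_append]
      have : w.dropWhile (fun d => !PySem.Chars.isspace d) = [] :=
        List.dropWhile_eq_nil_iff.2 (fun d hd => by simp [hw d (by simp [hd])])
      rw [this]
      cases b with
      | nil => simp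
      | cons d b => simp [List.dropWhile_cons, hb d (by simp)]
    rw [List.cons_append, pvWordsOf, if_neg (by simp [hc]), htw, hdw]
    simp [pvWordsOf_space hb]

theorem shape_tail {r : List Char}
    (hhead : ∀ hne : r ≠ [], PySem.Chars.isspace (r.head hne) = false)
    (h : (pvWordsOf r).length ≤ 1) :
    ∀ c ∈ r.dropWhile (fun d => !PySem.Chars.isspace d), PySem.Chars.isspace c = true := by
  cases r with
  | nil => simp
  | cons c r' =>
    have hc : PySem.Chars.isspace c = false := by simpa using hhead (by simp)
    have hpv : pvWordsOf (c :: r') = (c :: r'.takeWhile (fun d => !PySem.Chars.isspace d)) ::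
        pvWordsOf (r'.dropWhile (fun d => !PySem.Chars.isspace d)) := by
      rw [pvWordsOf, if_neg (by simp [hc])]
    have hnil : pvWordsOf (r'.dropWhile (fun d => !PySem.Chars.isspace d)) = [] := by
      rw [hpv] at h
      simpa using h
    intro d hd
    simp only [List.dropWhile_cons, hc] at hd
    simp at hd
    exact pvWordsOf_eq_nil hnil d hd

theorem shape_of_le_one {s : List Char} (h : (pvWordsOf s).length ≤ 1) :
    ∃ a w b, s = a ++ w ++ b ∧ (∀ c ∈ a, PySem.Chars.isspace c = true) ∧
      (∀ c ∈ w, PySem.Chars.isspace c = false) ∧ (∀ c ∈ b, PySem.Chars.isspace c = true) := by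
  have hsr : pvWordsOf s = pvWordsOf (s.dropWhile (fun d => PySem.Chars.isspace d)) := by
    conv_lhs => rw [← List.takeWhile_append_dropWhile (p := fun d => PySem.Chars.isspace d) (l := s)]
    exact pvWordsOf_space_append (fun c hc => by simpa using List.mem_takeWhile_imp hc)
  refine ⟨s.takeWhile (fun d => PySem.Chars.isspace d),
    (s.dropWhile (fun d => PySem.Chars.isspace d)).takeWhile (fun d => !PySem.Chars.isspace d),
    (s.dropWhile (fun d => PySem.Chars.isspace d)).dropWhile (fun d => !PySem.Chars.isspace d),
    by rw [List.append_assoc, List.takeWhile_append_dropWhile, List.takeWhile_append_dropWhile],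
    fun c hc => by simpa using List.mem_takeWhile_imp hc,
    fun c hc => by simpa using List.mem_takeWhile_imp hc, ?_⟩
  exact shape_tail
    (fun hne => by simpa using List.head_dropWhile_not (p := fun d => PySem.Chars.isspace d) hne)
    (by rw [← hsr]; exact h)


theorem lowerChar_of_isspace {c : Char} (h : PySem.Chars.isspace c = true) :
    PySem.Chars.lowerChar c = c := by
  have hup : PySem.Chars.isupper c = false := by
    simp only [PySem.Chars.isspace, Bool.or_eq_true, Bool.and_eq_true, decide_eq_true_eq] at h
    simp only [PySem.Chars.isupper, Bool.and_eq_false_iff, decide_eq_false_iff_not, Char.not_le,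
      Char.lt_def, UInt32.lt_iff_toNat_lt]
    simp only [Char.toNat] at h
    have hAv : ('A'.val.toNat) = 65 := rfl
    have hZv : ('Z'.val.toNat) = 90 := rfl
    omega
  simp [PySem.Chars.lowerChar, hup]

theorem ends_s_no_space_tail {x y : List Char}
    (h : PySem.Chars.endswith (PySem.Chars.lower (x ++ y)) ['s'] = true)
    (hy : ∀ c ∈ y, PySem.Chars.isspace c = true) : y = [] := by
  by_contra hne
  obtain ⟨t, ht⟩ := (PySem.Chars.endswith_iff _ _).1 h
  have h1 : (PySem.Chars.lower (x ++ y)).getLast? = some 's' := by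
    rw [← ht]
    exact List.getLast?_concat
  have hmapne : List.map PySem.Chars.lowerChar y ≠ [] := by
    simpa using hne
  rw [show PySem.Chars.lower (x ++ y) =
        List.map PySem.Chars.lowerChar x ++ List.map PySem.Chars.lowerChar y by
      simp [PySem.Chars.lower],
    List.getLast?_append_of_ne_nil _ hmapne, List.getLast?_map,
    List.getLast?_eq_some_getLast hne] at h1
  have hd : y.getLast hne ∈ y := List.getLast_mem hne
  have hs := hy _ hd
  rw [Option.map_some] at h1
  have h2 : PySem.Chars.lowerChar (y.getLast hne) = 's' := by injection h1
  rw [lowerChar_of_isspace hs] at h2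
  rw [h2] at hs
  simp [PySem.Chars.isspace] at hs

-- chars of stripChars are chars of the original
theorem mem_stripChars {w chars : List Char} {c : Char} (h : c ∈ PySem.Chars.stripChars w chars) :
    c ∈ w := by
  simp only [PySem.Chars.stripChars] at h
  rw [List.mem_reverse] at h
  have h2 := (List.dropWhile_sublist _).subset h
  rw [List.mem_reverse] at h2
  exact (List.dropWhile_sublist _).subset h2

theorem length_stripChars_le (w chars : List Char) :
    (PySem.Chars.stripChars w chars).length ≤ w.length := by
  simp only [PySem.Chars.stripChars, List.length_reverse]
  calc (List.dropWhile _ (List.dropWhile _ w).reverse).length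
      ≤ (List.dropWhile (fun c => chars.contains c) w).reverse.length := (List.dropWhile_sublist _).length_le
    _ ≤ w.length := by simpa using (List.dropWhile_sublist _).length_le

-- main single-word lemma: with enough fuel, A's recursion equals B's peel loop
theorem gsoA_single (fuel : Nat) : ∀ (a w b : List Char),
    (∀ c ∈ a, PySem.Chars.isspace c = true) → (∀ c ∈ w, PySem.Chars.isspace c = false) →
    (∀ c ∈ b, PySem.Chars.isspace c = true) → (a ++ w ++ b).length + 1 ≤ fuel →
    gsoA fuel (a ++ w ++ b) = classifyB (a ++ w ++ b) := by
  induction fuel with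
  | zero => intro a w b _ _ _ hf; omega
  | succ f ih =>
    intro a w b ha hw hb hf
    have hwords : PySem.Chars.split₀ (a ++ w ++ b) = if w = [] then [] else [w] := by
      rw [split₀_eq]; exact pvWordsOf_shape ha hw hb
    have hlen : ¬ (PySem.Chars.split₀ (a ++ w ++ b)).length > 1 := by
      rw [hwords]; split <;> simp
    by_cases hcap : pyCapitalize (a ++ w ++ b) ∈ PySem.Dict.values soilOrderMappings
    · rw [gsoA, classifyB]
      simp only [if_neg hlen]
      have hcap2 : pyCapitalize (a ++ w ++ b) ∈ gsoOrderNames := by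
        unfold gsoOrderNames; exact (PySem.Set.mem_ofList _ _).2 hcap
      rw [if_pos hcap, if_pos hcap2]
    · have hcap2 : pyCapitalize (a ++ w ++ b) ∉ gsoOrderNames := fun hmem =>
        hcap ((PySem.Set.mem_ofList _ _).1 hmem)
      by_cases hend : PySem.Chars.endswith (PySem.Chars.lower (a ++ w ++ b)) ['s'] = true
      · -- peel branch: the trailing space block is empty and w is nonempty
        have hbnil : b = [] := ends_s_no_space_tail hend hb
        subst hbnil
        have hwne : w ≠ [] := by
          intro hwnil
          subst hwnil
          have : a = [] := ends_s_no_space_tail (x := ([] : List Char)) (by simpa using hend) ha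
          subst this
          simp [PySem.Chars.endswith, PySem.Chars.lower] at hend
        rw [gsoA, classifyB]
        simp only [if_neg hlen, if_pos hend, if_neg hcap, if_neg hcap2]
        rw [dif_pos hend]
        rw [PySem.List.slice_to_neg_one]
        have hdrop : (a ++ w ++ ([] : List Char)).dropLast = a ++ w.dropLast ++ [] := by
          simp [List.dropLast_append_of_ne_nil, hwne]
        rw [hdrop]
        have := ih a w.dropLast [] ha
          (fun c hc => hw c ((List.dropLast_sublist w).subset hc)) (by simp)
          (by simp at hf ⊢
              have : w.dropLast.length = w.length - 1 := List.length_dropLast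
              have hw1 : 1 ≤ w.length := by
                cases w with
                | nil => exact absurd rfl hwne
                | cons _ _ => simp
              omega)
        simpa using this
      · rw [gsoA, classifyB]
        simp only [if_neg hlen, if_neg hcap, if_neg hcap2]
        rw [if_neg hend, dif_neg hend]
        rfl

theorem gsoALoop_eq (ws : List (List Char)) (fuel : Nat)
    (h : ∀ w ∈ ws, (∀ c ∈ w, PySem.Chars.isspace c = false) ∧ w.length + 1 ≤ fuel) :
    gsoALoop fuel ws = gsoBLoop ws := by
  induction ws with
  | nil => simp [gsoALoop, gsoBLoop]
  | cons w rest ihw =>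
    obtain ⟨hns, hlen⟩ := h w (by simp)
    have hhead : gsoA fuel (PySem.Chars.stripChars w gsoPunct) =
        classifyB (PySem.Chars.stripChars w gsoPunct) := by
      have := gsoA_single fuel [] (PySem.Chars.stripChars w gsoPunct) []
        (by simp) (fun c hc => hns c (mem_stripChars hc)) (by simp)
        (by have := length_stripChars_le w gsoPunct; simp; omega)
      simpa using this
    rw [gsoALoop, gsoBLoop, hhead, ihw (fun v hv => h v (by simp [hv]))]

-- ===== VERDICT (by name: the statement is the Claim_ definition above) =====
theorem get_soil_order_spec : Claim_equal_get_soil_order := by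
  intro s _
  unfold Spec_get_soil_order get_soil_order get_soil_order_alt
  by_cases hm : (PySem.Chars.split₀ s.toList).length > 1
  · rw [show s.toList.length + 2 = (s.toList.length + 1) + 1 from rfl, gsoA]
    simp only [if_pos hm]
    congr 1
    apply gsoALoop_eq
    intro w hwmem
    rw [List.mem_reverse, split₀_eq] at hwmem
    obtain ⟨h1, h2⟩ := mem_pvWordsOf hwmem
    exact ⟨h1, by omega⟩
  · have hle : (pvWordsOf s.toList).length ≤ 1 := by rw [← split₀_eq]; omega
    obtain ⟨a, w, b, hsplit, ha, hw2, hb⟩ := shape_of_le_one hle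
    simp only [if_neg hm]
    congr 1
    rw [hsplit]
    exact gsoA_single ((a ++ w ++ b).length + 2) a w b ha hw2 hb (by omega)
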